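-- pv_equiv track=rewrite | github.com/duongbaongoc/genomics-analysis-gui | 32-core programs/filter_snips.py | get_am
-- ===== SOURCE A (Python) =====
-- def get_am(L):
-- 	#conver L into a 2d list where each inner list has codes from all seqs at a snip position
-- 	_2d_list = []
-- 	for n_pos in range(len(L[0])):
-- 		inner_list = []
-- 		for seq in L:
-- 			inner_list.append(seq[n_pos])
-- 		_2d_list.append(inner_list)
--
-- 	#call get_am_help to convert each inner list into an am code
-- 	result = []
-- 	for inner_list in _2d_list:
-- 		am_code = get_am_help(inner_list)
-- 		result.append(am_code)
-- 	return result
--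
-- def get_am_help(list):
-- 	if 'A' in list and 'C' in list and 'G' in list and 'T' in list:
-- 		return 'N'
-- 	if 'A' in list and 'C' in list and 'G' in list:
-- 		return 'V'
-- 	if 'A' in list and 'C' in list and 'T' in list:
-- 		return 'H'
-- 	if 'A' in list and 'G' in list and 'T' in list:
-- 		return 'D'
-- 	if 'C' in list and 'G' in list and 'T' in list:
-- 		return 'B'
-- 	if 'A' in list and 'G' in list:
-- 		return 'R'
-- 	if 'A' in list and 'C' in list:
-- 		return 'M'
-- 	if 'C' in list and 'T' in list:
-- 		return 'Y'
-- 	if 'G' in list and 'T' in list: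
-- 		return 'K'
-- 	if 'C' in list and 'G' in list:
-- 		return 'S'
-- 	if 'A' in list and 'T' in list:
-- 		return 'W'
-- 	if 'A' in list and '-' in list:
-- 		return 'X'
-- 	if 'C' in list and '-' in list:
-- 		return 'X'
-- 	if 'G' in list and '-' in list:
-- 		return 'X'
-- 	if 'T' in list and '-' in list:
-- 		return 'X'
-- 	return list[0]
-- ===== SOURCE B (Python) =====
-- AM_TABLE = {'ACGT': 'N', 'ACG': 'V', 'ACT': 'H', 'AGT': 'D', 'CGT': 'B',
--             'AG': 'R', 'AC': 'M', 'CT': 'Y', 'GT': 'K', 'CG': 'S', 'AT': 'W'}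
--
--
-- def get_am(L):
--     result = []
--     for col in zip(*L):
--         key = ''.join(b for b in 'ACGT' if b in col)
--         if key in AM_TABLE:
--             result.append(AM_TABLE[key])
--         elif len(key) == 1 and '-' in col:
--             result.append('X')
--         else:
--             result.append(col[0])
--     return result
-- ===== Notes on version B (the rewrite author's own statement) =====
-- stated objective: simpler
-- what changed: Replaces A's 15-branch ordered membership cascade and hand-built transpose with zip(*L) columns and a single table lookup keyed by the column's canonical base set, falling back to 'X' or the column's first char.
import Mathlib
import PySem

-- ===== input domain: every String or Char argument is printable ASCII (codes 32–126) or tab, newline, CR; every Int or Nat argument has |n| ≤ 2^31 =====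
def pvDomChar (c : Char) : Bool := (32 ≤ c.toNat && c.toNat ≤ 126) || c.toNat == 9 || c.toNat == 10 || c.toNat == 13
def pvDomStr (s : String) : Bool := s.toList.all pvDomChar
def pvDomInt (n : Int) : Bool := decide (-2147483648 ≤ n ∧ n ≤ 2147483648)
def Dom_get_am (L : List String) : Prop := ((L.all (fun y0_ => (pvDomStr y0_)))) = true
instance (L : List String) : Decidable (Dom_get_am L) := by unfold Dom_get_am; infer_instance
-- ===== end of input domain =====

-- B replaces A's 15-branch ordered membership cascade by a single canonical-key table
-- lookup over the column's set of bases (objective: simpler).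

-- ===== PORT A =====
-- literal port of get_am_help's if-cascade; list[0] ported as headD ' '
-- (the column lists are nonempty under Pre_get_am, so the default is never used there)
def get_am_help (l : List Char) : String :=
  if 'A' ∈ l ∧ 'C' ∈ l ∧ 'G' ∈ l ∧ 'T' ∈ l then "N"
  else if 'A' ∈ l ∧ 'C' ∈ l ∧ 'G' ∈ l then "V"
  else if 'A' ∈ l ∧ 'C' ∈ l ∧ 'T' ∈ l then "H"
  else if 'A' ∈ l ∧ 'G' ∈ l ∧ 'T' ∈ l then "D"
  else if 'C' ∈ l ∧ 'G' ∈ l ∧ 'T' ∈ l then "B"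
  else if 'A' ∈ l ∧ 'G' ∈ l then "R"
  else if 'A' ∈ l ∧ 'C' ∈ l then "M"
  else if 'C' ∈ l ∧ 'T' ∈ l then "Y"
  else if 'G' ∈ l ∧ 'T' ∈ l then "K"
  else if 'C' ∈ l ∧ 'G' ∈ l then "S"
  else if 'A' ∈ l ∧ 'T' ∈ l then "W"
  else if 'A' ∈ l ∧ '-' ∈ l then "X"
  else if 'C' ∈ l ∧ '-' ∈ l then "X"
  else if 'G' ∈ l ∧ '-' ∈ l then "X"
  else if 'T' ∈ l ∧ '-' ∈ l then "X"
  else String.mk [l.headD ' ']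

-- outer loops: for n_pos in range(len(L[0])): for seq in L: seq[n_pos]
-- (seq[n_pos] ported as pyGet?; in range everywhere under Pre_get_am)
def get_am (L : List String) : List String :=
  let _2d_list := (List.range (L.headD "").length).map
      (fun n_pos => L.map (fun seq => (PySem.Str.pyGet? seq (n_pos : Int)).getD ' '))
  _2d_list.map get_am_help

-- ===== PORT B =====
def amTable : List (List Char × String) :=
  [(['A','C','G','T'], "N"), (['A','C','G'], "V"), (['A','C','T'], "H"),
   (['A','G','T'], "D"), (['C','G','T'], "B"),
   (['A','G'], "R"), (['A','C'], "M"), (['C','T'], "Y"),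
   (['G','T'], "K"), (['C','G'], "S"), (['A','T'], "W")]

def amCode (col : List Char) : String :=
  let key := ['A','C','G','T'].filter (fun b => b ∈ col)
  match amTable.lookup key with
  | some code => code
  | none => if key.length = 1 ∧ '-' ∈ col then "X" else String.mk [col.headD ' ']

-- zip(*L) truncates to the shortest sequence
def get_am_alt (L : List String) : List String :=
  let m := match L with
    | [] => 0
    | s :: rest => rest.foldl (fun acc t => min acc t.length) s.length
  ((List.range m).map
      (fun i => L.map (fun s => (PySem.Str.pyGet? s (i : Int)).getD ' '))).map amCode

-- ===== PRECONDITION & SPEC =====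
-- Pre_ excludes exactly the inputs on which A raises IndexError: the empty list
-- (L[0]) and ragged inputs where some sequence is shorter than L[0].
def Pre_get_am (L : List String) : Prop :=
  L ≠ [] ∧ ∀ s ∈ L, (L.headD "").length ≤ s.length
instance (L : List String) : Decidable (Pre_get_am L) := by unfold Pre_get_am; infer_instance

def pvWitness_get_am : List String := ["ACGA-", "AG-TA", "ACGTC"]

def Spec_get_am (L : List String) (out : List String) : Prop := out = get_am_alt L
instance (L : List String) (out : List String) : Decidable (Spec_get_am L out) := by unfold Spec_get_am; infer_instance

-- ===== CLAIM (what is proved, stated in full; the proofs are below) =====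
def Claim_equal_get_am : Prop := ∀ (L : List String), Dom_get_am L → Pre_get_am L → Spec_get_am L (get_am L)

-- ===== LEMMAS AND PROOFS =====

-- per-column: the cascade and the table lookup agree
theorem amCode_eq (col : List Char) : get_am_help col = amCode col := by
  by_cases hA : 'A' ∈ col <;> by_cases hC : 'C' ∈ col <;>
    by_cases hG : 'G' ∈ col <;> by_cases hT : 'T' ∈ col <;>
    by_cases hD : '-' ∈ col <;>
    simp [get_am_help, amCode, amTable, hA, hC, hG, hT, hD, List.filter, List.lookup]

theorem foldl_min_const (rest : List String) (acc : Nat)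
    (h : ∀ t ∈ rest, acc ≤ t.length) :
    rest.foldl (fun a t => min a t.length) acc = acc := by
  induction rest with
  | nil => rfl
  | cons t ts ih =>
      have h1 : acc ≤ t.length := h t (List.mem_cons_self ..)
      simp only [List.foldl_cons, min_eq_left h1]
      exact ih fun u hu => h u (List.mem_cons_of_mem _ hu)

-- ===== VERDICT (by name: the statement is the Claim_ definition above) =====
theorem get_am_spec : Claim_equal_get_am := by
  intro L _ hPre
  obtain ⟨hne, hlen⟩ := hPre
  unfold Spec_get_am get_am get_am_alt
  obtain ⟨s, rest, rfl⟩ : ∃ s rest, L = s :: rest := by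
    cases L with
    | nil => exact absurd rfl hne
    | cons s rest => exact ⟨s, rest, rfl⟩
  have hm : rest.foldl (fun a t => min a t.length) s.length = s.length :=
    foldl_min_const rest s.length fun t ht =>
      hlen t (List.mem_cons_of_mem _ ht)
  simp only [List.headD_cons, hm, List.map_map]
  exact List.map_congr_left fun n _ => amCode_eq _
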